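-- pv_equiv track=rewrite | github.com/luisricardoferraz/book-similarity | test/tutorial/tutorial/spiders/bookSpider.py | checkIsbnExistence
-- ===== SOURCE A (Python) =====
-- def checkIsbnExistence(isbnList):
--     isbnDictionary = {
--         "isbnThirteenDigits" : "",
--         "isbnTenDigits" : ""
--     }
--     for isbn in isbnList:
--         if len(isbn) == 13:
--             isbnDictionary["isbnThirteenDigits"] = isbn
--         elif len(isbn) == 10:
--             isbnDictionary["isbnTenDigits"] = isbn
--     return isbnDictionary
-- ===== SOURCE B (Python) =====
-- def checkIsbnExistence(isbnList):
--     lst = list(isbnList)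
--     return {
--         "isbnThirteenDigits": next((x for x in reversed(lst) if len(x) == 13), ""),
--         "isbnTenDigits": next((x for x in reversed(lst) if len(x) == 10), ""),
--     }
-- ===== Notes on version B (the rewrite author's own statement) =====
-- stated objective: alternative
-- what changed: Replaces the single classify-and-overwrite mutating loop with two independent last-occurrence searches from the end of the list, building the dict once from the two results.
import Mathlib
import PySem

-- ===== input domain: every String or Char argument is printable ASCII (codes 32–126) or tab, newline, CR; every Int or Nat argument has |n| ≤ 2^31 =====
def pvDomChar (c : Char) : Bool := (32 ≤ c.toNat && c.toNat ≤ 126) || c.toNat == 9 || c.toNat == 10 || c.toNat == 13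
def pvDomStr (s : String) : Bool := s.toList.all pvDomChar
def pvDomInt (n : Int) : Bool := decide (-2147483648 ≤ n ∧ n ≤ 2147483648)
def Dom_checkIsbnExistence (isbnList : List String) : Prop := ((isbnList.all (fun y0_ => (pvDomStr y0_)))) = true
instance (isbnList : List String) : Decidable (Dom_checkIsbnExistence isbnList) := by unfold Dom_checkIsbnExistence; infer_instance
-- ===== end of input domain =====

-- B replaces A's single classify-and-overwrite mutating loop with two independent
-- last-occurrence searches from the end (objective: alternative decomposition).

-- ===== PORT A =====
-- for isbn in isbnList: classify by length, overwriting the dict field each time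
def checkIsbnExistence (isbnList : List String) : List (String × String) :=
  let isbnDictionary : PySem.Dict String String :=
    PySem.Dict.ofList [("isbnThirteenDigits", ""), ("isbnTenDigits", "")]
  let isbnDictionary :=
    isbnList.foldl (fun d isbn =>
      if PySem.Str.len isbn == 13 then d.insert "isbnThirteenDigits" isbn
      else if PySem.Str.len isbn == 10 then d.insert "isbnTenDigits" isbn
      else d) isbnDictionary
  isbnDictionary.items

-- ===== PORT B =====
-- next((x for x in reversed(lst) if len(x) == n), "")
def checkIsbnExistence_alt (isbnList : List String) : List (String × String) :=
  let lst := isbnList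
  [("isbnThirteenDigits", (lst.reverse.find? (fun x => PySem.Str.len x == 13)).getD ""),
   ("isbnTenDigits", (lst.reverse.find? (fun x => PySem.Str.len x == 10)).getD "")]

-- ===== PRECONDITION & SPEC =====
def Spec_checkIsbnExistence (isbnList : List String) (out : List (String × String)) : Prop := out = checkIsbnExistence_alt isbnList
instance (isbnList : List String) (out : List (String × String)) : Decidable (Spec_checkIsbnExistence isbnList out) := by unfold Spec_checkIsbnExistence; infer_instance

-- ===== CLAIM (what is proved, stated in full; the proofs are below) =====
def Claim_equal_checkIsbnExistence : Prop := ∀ (isbnList : List String), Dom_checkIsbnExistence isbnList → Spec_checkIsbnExistence isbnList (checkIsbnExistence isbnList)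

-- ===== LEMMAS AND PROOFS =====

theorem or_single_getD {α : Type} (o : Option α) (c : Bool) (x a : α) :
    (o.or (if c then some x else none)).getD a = o.getD (if c then x else a) := by
  cases o <;> cases c <;> simp

theorem find?_single {α : Type} (p : α → Bool) (x : α) :
    List.find? p [x] = if p x then some x else none := by
  by_cases h : p x <;> simp [List.find?, h]

-- the fold keeps the dict in the shape [(k13, a), (k10, b)], a/b = last match so far
theorem fold_shape (l : List String) (a b : String) :
    l.foldl (fun d isbn =>
      if PySem.Str.len isbn == 13 then d.insert "isbnThirteenDigits" isbn
      else if PySem.Str.len isbn == 10 then d.insert "isbnTenDigits" isbn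
      else d) (PySem.Dict.mk [("isbnThirteenDigits", a), ("isbnTenDigits", b)])
    = PySem.Dict.mk
        [("isbnThirteenDigits", (l.reverse.find? (fun x => PySem.Str.len x == 13)).getD a),
         ("isbnTenDigits", (l.reverse.find? (fun x => PySem.Str.len x == 10)).getD b)] := by
  induction l generalizing a b with
  | nil => rfl
  | cons hd tl ih =>
    simp only [List.foldl_cons, List.reverse_cons, List.find?_append,
      find?_single, or_single_getD]
    by_cases h13 : PySem.Str.len hd == 13
    · have hne : ¬ PySem.Str.len hd == 10 := by
        simp only [beq_iff_eq] at *; omega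
      rw [if_pos h13, if_pos h13, if_neg hne]
      rw [show (PySem.Dict.mk [("isbnThirteenDigits", a), ("isbnTenDigits", b)]).insert
            "isbnThirteenDigits" hd
          = PySem.Dict.mk [("isbnThirteenDigits", hd), ("isbnTenDigits", b)] from rfl]
      exact ih hd b
    · rw [if_neg h13, if_neg h13]
      by_cases h10 : PySem.Str.len hd == 10
      · rw [if_pos h10, if_pos h10]
        rw [show (PySem.Dict.mk [("isbnThirteenDigits", a), ("isbnTenDigits", b)]).insert
              "isbnTenDigits" hd
            = PySem.Dict.mk [("isbnThirteenDigits", a), ("isbnTenDigits", hd)] from rfl]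
        exact ih a hd
      · rw [if_neg h10, if_neg h10]
        exact ih a b

-- ===== VERDICT (by name: the statement is the Claim_ definition above) =====
theorem checkIsbnExistence_spec : Claim_equal_checkIsbnExistence := by
  intro isbnList _
  show checkIsbnExistence isbnList = checkIsbnExistence_alt isbnList
  unfold checkIsbnExistence checkIsbnExistence_alt
  dsimp only
  rw [show PySem.Dict.ofList [("isbnThirteenDigits", ""), ("isbnTenDigits", "")]
      = PySem.Dict.mk [("isbnThirteenDigits", ""), ("isbnTenDigits", "")] from rfl]
  rw [fold_shape]
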